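-- pv_equiv track=rewrite | github.com/ZuberLab/minigene-process-nf | bin/minigene_match.py | build_barcode_maps
-- ===== SOURCE A (Python) =====
-- DNA_ALPHABET = "ACGT"
--
-- def generate_barcode_variants(seq: str, max_mismatches: int):
--     """
--     Generate all sequences within <= max_mismatches of seq.
--     Only safe for short barcodes (e.g. 8 nt).
--     """
--     variants = {seq}
--     n = len(seq)
--
--     if max_mismatches >= 1:
--         for i in range(n):
--             for base in DNA_ALPHABET:
--                 if base != seq[i]:
--                     variants.add(seq[:i] + base + seq[i + 1 :])
--
--     if max_mismatches >= 2:
--         for i in range(n):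
--             for j in range(i + 1, n):
--                 for b1 in DNA_ALPHABET:
--                     if b1 == seq[i]:
--                         continue
--                     for b2 in DNA_ALPHABET:
--                         if b2 == seq[j]:
--                             continue
--                         s_list = list(seq)
--                         s_list[i] = b1
--                         s_list[j] = b2
--                         variants.add("".join(s_list))
--
--     return variants
--
-- def build_barcode_maps(design, max_bc_mismatches: int):
--     """
--     Build:
--       - barcode_to_design: exact barcode -> design record
--       - variant_map: barcode variant (<= mism) -> canonical barcode or None if ambiguous
--       - ambiguous_variants: set of variants shared by multiple barcodes
--     """
--     barcode_to_design = {}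
--     for rec in design:
--         bc = rec["barcode"]
--         if bc in barcode_to_design:
--             raise ValueError(f"Duplicate barcode in design: {bc}")
--         barcode_to_design[bc] = rec
--
--     if max_bc_mismatches < 0:
--         max_bc_mismatches = 0
--
--     variant_map = {}
--     ambiguous_variants = set()
--
--     for rec in design:
--         bc = rec["barcode"]
--         variants = generate_barcode_variants(bc, max_bc_mismatches)
--         for v in variants:
--             if v in variant_map:
--                 if variant_map[v] != bc:
--                     variant_map[v] = None
--                     ambiguous_variants.add(v)
--             else:
--                 variant_map[v] = bc
--
--     return barcode_to_design, variant_map, ambiguous_variants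
-- ===== SOURCE B (Python) =====
-- DNA_ALPHABET = "ACGT"
--
--
-- def _combinations(items, m):
--     """All m-element ascending selections from items, lexicographic order."""
--     if m == 0:
--         return [[]]
--     res = []
--     for idx in range(len(items)):
--         for tail in _combinations(items[idx + 1:], m - 1):
--             res.append([items[idx]] + tail)
--     return res
--
--
-- def _product(alpha, m):
--     """All length-m words over alpha, leftmost position varying slowest."""
--     if m == 0:
--         return [[]]
--     return [[b] + rest for b in alpha for rest in _product(alpha, m - 1)]
--
--
-- def _variant_stream(seq, k):
--     """Set of all variants of seq with <= k mismatches."""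
--     n = len(seq)
--     out = {seq}
--     for m in range(1, k + 1):
--         for pos in _combinations(list(range(n)), m):
--             for repl in _product(DNA_ALPHABET, m):
--                 if all(repl[t] != seq[pos[t]] for t in range(m)):
--                     chars = list(seq)
--                     for t in range(m):
--                         chars[pos[t]] = repl[t]
--                     out.add("".join(chars))
--     return out
--
--
-- def build_barcode_maps(design, max_bc_mismatches: int):
--     barcode_to_design = {}
--     for rec in design:
--         bc = rec["barcode"]
--         if bc in barcode_to_design:
--             raise ValueError(f"Duplicate barcode in design: {bc}")
--         barcode_to_design[bc] = rec
--
--     k = 0 if max_bc_mismatches < 0 else min(max_bc_mismatches, 2)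
--
--     stream = [(v, rec["barcode"])
--               for rec in design
--               for v in _variant_stream(rec["barcode"], k)]
--
--     first_owner = {}
--     for v, bc in stream:
--         first_owner.setdefault(v, bc)
--
--     ambiguous_variants = set()
--     for v, bc in stream:
--         if bc != first_owner[v]:
--             ambiguous_variants.add(v)
--
--     variant_map = {v: (None if v in ambiguous_variants else bc)
--                    for v, bc in first_owner.items()}
--
--     return barcode_to_design, variant_map, ambiguous_variants
-- ===== Notes on version B (the rewrite author's own statement) =====
-- stated objective: alternative
-- what changed: Replaces A's online None-sentinel bookkeeping with a batch scheme: flatten the design into one (variant, barcode) stream, take first owners with dict.setdefault, collect conflicting variants in a second pass, and derive variant_map by a comprehension over first_owner; variant generation is rewritten as one loop over mismatch count k using hand-rolled combinations of positions and products of replacement bases (capped at 2 like A).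
import Mathlib
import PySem

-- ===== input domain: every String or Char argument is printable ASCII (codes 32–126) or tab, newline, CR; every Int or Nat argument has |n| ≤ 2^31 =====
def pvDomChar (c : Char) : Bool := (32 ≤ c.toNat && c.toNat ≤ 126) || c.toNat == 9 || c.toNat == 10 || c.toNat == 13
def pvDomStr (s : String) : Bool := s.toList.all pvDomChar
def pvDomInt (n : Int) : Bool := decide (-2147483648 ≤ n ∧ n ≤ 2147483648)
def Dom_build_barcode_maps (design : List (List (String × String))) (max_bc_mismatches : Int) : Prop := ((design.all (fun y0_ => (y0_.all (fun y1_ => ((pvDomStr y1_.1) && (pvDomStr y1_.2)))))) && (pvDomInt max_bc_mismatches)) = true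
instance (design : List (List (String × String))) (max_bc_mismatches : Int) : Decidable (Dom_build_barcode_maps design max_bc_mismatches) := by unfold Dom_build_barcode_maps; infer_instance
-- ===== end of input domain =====

-- B restructures the variant/ambiguity maps as batch passes over one flattened
-- (variant, barcode) stream instead of A's online None-sentinel updates; objective:
-- alternative decomposition (same asymptotic cost).

-- ===== PORT A =====
-- DNA_ALPHABET = "ACGT"
def pvDNA : List Char := ['A', 'C', 'G', 'T']

-- rec["barcode"] (first-match association-list lookup; none = KeyError)
def pvRecBC (rec : List (String × String)) : Option String :=
  (PySem.Dict.mk rec).get? "barcode"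

-- The duplicate-barcode check loop, IDENTICAL in Source A and Source B (shared helper):
-- none = the loop raised (KeyError: no "barcode", or ValueError: duplicate barcode).
def pvScanBarcodes (design : List (List (String × String))) :
    Option (PySem.Dict String (List (String × String))) :=
  design.foldl
    (fun acc rec =>
      match acc with
      | none => none
      | some d =>
        match pvRecBC rec with
        | none => none
        | some bc => if d.contains bc then none else some (d.insert bc rec))
    (some PySem.Dict.empty)

-- generate_barcode_variants of Source A; seq[:i] + base + seq[i+1:] is exact as
-- take/cons/drop for 0 ≤ i < len (PySem.List.slice_to_natCast / slice_from_natCast),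
-- and list(seq) with item assignment is List.set.
def generate_barcode_variants (seq : String) (max_mismatches : Int) : PySem.Set String :=
  let s := seq.toList
  let n := s.length
  let variants : PySem.Set String := PySem.Set.ofList [seq]
  let variants :=
    if 1 ≤ max_mismatches then
      (List.range n).foldl
        (fun vs i =>
          pvDNA.foldl
            (fun vs base =>
              if base ≠ s.getD i 'A' then
                PySem.Set.add vs (String.ofList (s.take i ++ base :: s.drop (i + 1)))
              else vs)
            vs)
        variants
    else variants
  let variants :=
    if 2 ≤ max_mismatches then
      (List.range n).foldl
        (fun vs i =>
          (List.range' (i + 1) (n - (i + 1))).foldl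
            (fun vs j =>
              pvDNA.foldl
                (fun vs b1 =>
                  if b1 = s.getD i 'A' then vs
                  else
                    pvDNA.foldl
                      (fun vs b2 =>
                        if b2 = s.getD j 'A' then vs
                        else PySem.Set.add vs (String.ofList ((s.set i b1).set j b2)))
                      vs)
                vs)
            vs)
        variants
    else variants
  variants

def build_barcode_maps (design : List (List (String × String))) (max_bc_mismatches : Int) :
    (List (String × List (String × String))) × (List (String × Option String)) × List String :=
  match pvScanBarcodes design with
  | none => ([], [], [])  -- unreachable under Pre_: the Python raised
  | some btd =>
    let mm : Int := if max_bc_mismatches < 0 then 0 else max_bc_mismatches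
    let st :=
      design.foldl
        (fun (st : PySem.Dict String (Option String) × PySem.Set String) rec =>
          let bc := (PySem.Dict.mk rec).getD "barcode" ""
          (generate_barcode_variants bc mm).foldl
            (fun st v =>
              match st.1.get? v with
              | some old =>
                if old ≠ some bc then (st.1.insert v none, PySem.Set.add st.2 v) else st
              | none => (st.1.insert v (some bc), st.2))
            st)
        (PySem.Dict.empty, PySem.Set.empty)
    (btd.items, st.1.items, st.2)

-- ===== PORT B =====
-- _combinations of Source B (recursion on m, loop over starting index)
def pvCombos : List Nat → Nat → List (List Nat)
  | _, 0 => [[]]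
  | items, m + 1 =>
    (List.range items.length).foldl
      (fun res idx =>
        res ++ (pvCombos (items.drop (idx + 1)) m).map (fun tail => items.getD idx 0 :: tail))
      []

-- _product of Source B
def pvProduct (alpha : List Char) : Nat → List (List Char)
  | 0 => [[]]
  | m + 1 => alpha.flatMap (fun b => (pvProduct alpha m).map (fun rest => b :: rest))

-- _variant_stream of Source B; the None-valued dict used for ordered dedup is PySem.Set
def pvVariantStream (seq : String) (k : Nat) : PySem.Set String :=
  let s := seq.toList
  let n := s.length
  let out : PySem.Set String := PySem.Set.ofList [seq]
  (List.range' 1 k).foldl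
    (fun out m =>
      (pvCombos (List.range n) m).foldl
        (fun out pos =>
          (pvProduct pvDNA m).foldl
            (fun out repl =>
              if (List.range m).all (fun t => repl.getD t 'A' != s.getD (pos.getD t 0) 'A') then
                PySem.Set.add out
                  (String.ofList
                    ((List.range m).foldl (fun cs t => cs.set (pos.getD t 0) (repl.getD t 'A')) s))
              else out)
            out)
        out)
    out

-- Source B pass 1: first_owner.setdefault(v, bc)
def pvFirstOwner (stream : List (String × String)) : PySem.Dict String String :=
  stream.foldl (fun d p => d.setdefault p.1 p.2) PySem.Dict.empty

-- Source B pass 2: ambiguous_variants (first_owner[v] is total under the stream's keys)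
def pvAmbiguous (fo : PySem.Dict String String) (stream : List (String × String)) :
    PySem.Set String :=
  stream.foldl
    (fun s p => if p.2 ≠ fo.getD p.1 "" then PySem.Set.add s p.1 else s)
    PySem.Set.empty

-- Source B pass 3: the dict comprehension over first_owner.items()
def pvVariantMap (fo : PySem.Dict String String) (amb : PySem.Set String) :
    List (String × Option String) :=
  fo.items.map (fun p => (p.1, if amb.contains p.1 then none else some p.2))

def build_barcode_maps_alt (design : List (List (String × String))) (max_bc_mismatches : Int) :
    (List (String × List (String × String))) × (List (String × Option String)) × List String :=
  match pvScanBarcodes design with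
  | none => ([], [], [])  -- unreachable under Pre_: the Python raised
  | some btd =>
    let k : Int := if max_bc_mismatches < 0 then 0 else min max_bc_mismatches 2
    let stream : List (String × String) :=
      design.foldl
        (fun acc rec =>
          let bc := (PySem.Dict.mk rec).getD "barcode" ""
          acc ++ (pvVariantStream bc k.toNat).map (fun v => (v, bc)))
        []
    let fo := pvFirstOwner stream
    let amb := pvAmbiguous fo stream
    (btd.items, pvVariantMap fo amb, amb)

-- ===== PRECONDITION & SPEC =====
-- Pre_ excludes exactly the inputs on which the Python A raises: a record without a
-- "barcode" key (KeyError) or two records with the same barcode (ValueError).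
def Pre_build_barcode_maps (design : List (List (String × String))) (max_bc_mismatches : Int) : Prop :=
  (∀ rec ∈ design, ((PySem.Dict.mk rec).get? "barcode").isSome = true) ∧
  (design.map (fun rec => (PySem.Dict.mk rec).getD "barcode" "")).Nodup

instance (design : List (List (String × String))) (max_bc_mismatches : Int) :
    Decidable (Pre_build_barcode_maps design max_bc_mismatches) := by
  unfold Pre_build_barcode_maps; infer_instance

def pvWitness_build_barcode_maps : (List (List (String × String))) × Int :=
  ([[("barcode", "AC")], [("barcode", "GT")]], 1)

def Spec_build_barcode_maps (design : List (List (String × String))) (max_bc_mismatches : Int)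
    (out : (List (String × List (String × String))) × (List (String × Option String)) × List String) : Prop :=
  out = build_barcode_maps_alt design max_bc_mismatches

instance (design : List (List (String × String))) (max_bc_mismatches : Int)
    (out : (List (String × List (String × String))) × (List (String × Option String)) × List String) :
    Decidable (Spec_build_barcode_maps design max_bc_mismatches out) := by
  unfold Spec_build_barcode_maps; infer_instance

-- ===== CLAIM (what is proved, stated in full; the proofs are below) =====
def Claim_equal_build_barcode_maps : Prop := ∀ (design : List (List (String × String))) (max_bc_mismatches : Int), Dom_build_barcode_maps design max_bc_mismatches → Pre_build_barcode_maps design max_bc_mismatches → Spec_build_barcode_maps design max_bc_mismatches (build_barcode_maps design max_bc_mismatches)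

-- ===== LEMMAS AND PROOFS =====

-- ---- generator lemmas ----
theorem pv_map_getD_range {α : Type} (l : List α) (d : α) :
    (List.range l.length).map (fun i => l.getD i d) = l := by
  apply List.ext_getElem
  · simp
  · intro i h1 h2
    simp [List.getD_eq_getElem?_getD, List.getElem?_eq_getElem h2]

theorem pvProduct_one (a : List Char) : pvProduct a 1 = a.map (fun b => [b]) := by
  induction a with
  | nil => rfl
  | cons x xs ih => simp [pvProduct] at ih ⊢; exact ih

theorem pvProduct_two (a : List Char) :
    pvProduct a 2 = a.flatMap (fun b1 => a.map (fun b2 => [b1, b2])) := by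
  show a.flatMap (fun b => (pvProduct a 1).map (fun rest => b :: rest)) = _
  rw [pvProduct_one]
  simp [List.map_map, Function.comp_def]

theorem pv_flatMap_singleton {α β : Type} (l : List α) (g : α → β) :
    l.flatMap (fun x => [g x]) = l.map g := by
  induction l <;> simp_all

theorem pv_drop_range (n m : Nat) : (List.range n).drop m = List.range' m (n - m) := by
  rw [List.range_eq_range', List.drop_range']; simp

theorem pv_getD_range (n i : Nat) (h : i < n) : (List.range n).getD i 0 = i := by
  rw [List.getD_eq_getElem _ _ (by simpa using h), List.getElem_range]

theorem pvCombos_one (items : List Nat) : pvCombos items 1 = items.map (fun i => [i]) := by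
  show (List.range items.length).foldl _ [] = _
  rw [PySem.List.foldl_append_eq_flatMap
    (g := fun idx => (pvCombos (items.drop (idx + 1)) 0).map (fun tail => items.getD idx 0 :: tail))]
  simp only [pvCombos, List.map_cons, List.map_nil, List.nil_append]
  rw [pv_flatMap_singleton (g := fun idx => [items.getD idx 0])]
  have := congrArg (List.map (fun i : Nat => [i])) (pv_map_getD_range items 0)
  simpa [List.map_map, Function.comp_def] using this

theorem pvCombos_range_two (n : Nat) :
    pvCombos (List.range n) 2 =
      (List.range n).flatMap
        (fun i => (List.range' (i + 1) (n - (i + 1))).map (fun j => [i, j])) := by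
  show (List.range (List.range n).length).foldl _ [] = _
  rw [PySem.List.foldl_append_eq_flatMap
    (g := fun idx => (pvCombos ((List.range n).drop (idx + 1)) 1).map
      (fun tail => (List.range n).getD idx 0 :: tail))]
  simp only [List.length_range, List.nil_append]
  apply List.flatMap_congr
  intro i hi
  have hin : i < n := List.mem_range.mp hi
  rw [pv_drop_range, pvCombos_one, pv_getD_range n i hin, List.map_map]
  rfl

theorem pv_pass1 (s : List Char) (out : PySem.Set String) :
    (pvCombos (List.range s.length) 1).foldl
      (fun out pos =>
        (pvProduct pvDNA 1).foldl
          (fun out repl =>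
            if (List.range 1).all (fun t => repl.getD t 'A' != s.getD (pos.getD t 0) 'A') then
              PySem.Set.add out
                (String.ofList
                  ((List.range 1).foldl (fun cs t => cs.set (pos.getD t 0) (repl.getD t 'A')) s))
            else out)
          out)
      out
    = (List.range s.length).foldl
        (fun vs i =>
          pvDNA.foldl
            (fun vs base =>
              if base ≠ s.getD i 'A' then
                PySem.Set.add vs (String.ofList (s.take i ++ base :: s.drop (i + 1)))
              else vs)
            vs)
        out := by
  rw [pvCombos_one, List.foldl_map]
  apply PySem.List.foldl_congr_mem'
  intro i hi out'
  have hin : i < s.length := List.mem_range.mp hi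
  rw [pvProduct_one, List.foldl_map]
  apply PySem.List.foldl_congr_mem'
  intro b _ vs
  have hr1 : List.range 1 = [0] := rfl
  simp only [hr1, List.all_cons, List.all_nil, List.getD_cons_zero, Bool.and_true,
    List.foldl_cons, List.foldl_nil]
  rw [List.set_eq_take_append_cons_drop, if_pos hin]
  simp [bne_iff_ne]

theorem pv_pass2 (s : List Char) (out : PySem.Set String) :
    (pvCombos (List.range s.length) 2).foldl
      (fun out pos =>
        (pvProduct pvDNA 2).foldl
          (fun out repl =>
            if (List.range 2).all (fun t => repl.getD t 'A' != s.getD (pos.getD t 0) 'A') then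
              PySem.Set.add out
                (String.ofList
                  ((List.range 2).foldl (fun cs t => cs.set (pos.getD t 0) (repl.getD t 'A')) s))
            else out)
          out)
      out
    = (List.range s.length).foldl
        (fun vs i =>
          (List.range' (i + 1) (s.length - (i + 1))).foldl
            (fun vs j =>
              pvDNA.foldl
                (fun vs b1 =>
                  if b1 = s.getD i 'A' then vs
                  else
                    pvDNA.foldl
                      (fun vs b2 =>
                        if b2 = s.getD j 'A' then vs
                        else PySem.Set.add vs (String.ofList ((s.set i b1).set j b2)))
                      vs)
                vs)
            vs)
        out := by
  rw [pvCombos_range_two, List.foldl_flatMap]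
  apply PySem.List.foldl_congr_mem'
  intro i _ out1
  rw [List.foldl_map]
  apply PySem.List.foldl_congr_mem'
  intro j _ out2
  rw [pvProduct_two, List.foldl_flatMap]
  apply PySem.List.foldl_congr_mem'
  intro b1 _ out3
  rw [List.foldl_map]
  have hr2 : List.range 2 = [0, 1] := rfl
  by_cases hb1 : b1 = s.getD i 'A'
  · rw [if_pos hb1]
    rw [PySem.List.foldl_congr_mem' pvDNA _ (fun acc _ => acc) out3 ?_]
    · exact PySem.List.foldl_ignore pvDNA out3
    · intro b2 _ acc
      simp [hr2, hb1]
  · rw [if_neg hb1]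
    apply PySem.List.foldl_congr_mem'
    intro b2 _ out4
    by_cases hb2 : b2 = s.getD j 'A'
    · simp [hr2, hb2]
    · simp only [hr2, List.all_cons, List.all_nil, List.getD_cons_zero, List.getD_cons_succ,
        Bool.and_true, List.foldl_cons, List.foldl_nil]
      rw [if_neg hb2, if_pos (by
        simp only [Bool.and_eq_true, bne_iff_ne, ne_eq]
        exact ⟨hb1, hb2⟩)]

theorem pv_gen_eq (seq : String) (mA : Int) (kn : Nat)
    (h1 : 1 ≤ mA ↔ 1 ≤ kn) (h2 : 2 ≤ mA ↔ 2 ≤ kn) (hk : kn ≤ 2) :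
    generate_barcode_variants seq mA = pvVariantStream seq kn := by
  interval_cases kn
  · have g1 : ¬ (1 : Int) ≤ mA := fun h => absurd (h1.mp h) (by omega)
    have g2 : ¬ (2 : Int) ≤ mA := fun h => absurd (h2.mp h) (by omega)
    simp only [generate_barcode_variants, pvVariantStream, if_neg g1, if_neg g2]
    rfl
  · have g1 : (1 : Int) ≤ mA := h1.mpr (by omega)
    have g2 : ¬ (2 : Int) ≤ mA := fun h => absurd (h2.mp h) (by omega)
    simp only [generate_barcode_variants, pvVariantStream, if_pos g1, if_neg g2]
    rw [show List.range' 1 1 = [1] from rfl, List.foldl_cons, List.foldl_nil]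
    exact (pv_pass1 seq.toList _).symm
  · have g1 : (1 : Int) ≤ mA := h1.mpr (by omega)
    have g2 : (2 : Int) ≤ mA := h2.mpr (by omega)
    simp only [generate_barcode_variants, pvVariantStream, if_pos g1, if_pos g2]
    rw [show List.range' 1 2 = [1, 2] from rfl, List.foldl_cons, List.foldl_cons, List.foldl_nil]
    rw [pv_pass1 seq.toList]
    exact (pv_pass2 seq.toList _).symm

-- ---- main-loop lemmas ----
def pvStepP (st : PySem.Dict String (Option String) × PySem.Set String) (p : String × String) :
    PySem.Dict String (Option String) × PySem.Set String :=
  match st.1.get? p.1 with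
  | some old => if old ≠ some p.2 then (st.1.insert p.1 none, PySem.Set.add st.2 p.1) else st
  | none => (st.1.insert p.1 (some p.2), st.2)

theorem pvFO_append (qs : List (String × String)) (p : String × String) :
    pvFirstOwner (qs ++ [p]) = (pvFirstOwner qs).setdefault p.1 p.2 := by
  simp [pvFirstOwner, List.foldl_append]

theorem pvFO_keys (qs : List (String × String)) :
    (pvFirstOwner qs).keys = PySem.Set.ofList (qs.map Prod.fst) := by
  induction qs using List.reverseRecOn with
  | nil => rfl
  | append_singleton qs p ih =>
    rw [pvFO_append, PySem.Dict.keys_setdefault, List.map_append, List.map_cons, List.map_nil,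
      PySem.Set.ofList_append_singleton]
    by_cases h : (pvFirstOwner qs).contains p.1 = true
    · rw [if_pos h, ih]
      have hm : p.1 ∈ PySem.Set.ofList (qs.map Prod.fst) := by
        rw [← ih]; exact (PySem.Dict.contains_iff_mem_keys _ _).mp h
      rw [PySem.Set.add_of_mem hm]
    · rw [if_neg h, ih]
      have hm : p.1 ∉ PySem.Set.ofList (qs.map Prod.fst) := by
        rw [← ih]; intro hmem; exact h ((PySem.Dict.contains_iff_mem_keys _ _).mpr hmem)
      rw [PySem.Set.add_of_not_mem hm]

theorem pvFO_keys_nodup (qs : List (String × String)) : (pvFirstOwner qs).keys.Nodup := by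
  rw [pvFO_keys]; exact PySem.Set.nodup_ofList _

theorem pvFO_mem_keys (qs : List (String × String)) (x : String) :
    x ∈ (pvFirstOwner qs).keys ↔ x ∈ qs.map Prod.fst := by
  rw [pvFO_keys]; exact PySem.Set.mem_ofList _ _

theorem pvAmb_congr (d d' : PySem.Dict String String) (qs : List (String × String))
    (h : ∀ q ∈ qs, d.getD q.1 "" = d'.getD q.1 "") :
    pvAmbiguous d qs = pvAmbiguous d' qs := by
  unfold pvAmbiguous
  apply PySem.List.foldl_congr_mem'
  intro q hq acc
  rw [h q hq]

theorem pvAmb_mem_aux (d : PySem.Dict String String) (qs : List (String × String)) :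
    ∀ (s0 : PySem.Set String) (x : String),
      x ∈ qs.foldl (fun s p => if p.2 ≠ d.getD p.1 "" then PySem.Set.add s p.1 else s) s0 →
      x ∈ s0 ∨ x ∈ qs.map Prod.fst := by
  induction qs with
  | nil => intro s0 x h; exact Or.inl h
  | cons q qs ih =>
    intro s0 x h
    simp only [List.foldl_cons] at h
    rcases ih _ x h with h' | h'
    · by_cases hc : q.2 ≠ d.getD q.1 ""
      · rw [if_pos hc] at h'
        rcases (PySem.Set.mem_add _ _ _).mp h' with h'' | h''
        · exact Or.inl h''
        · exact Or.inr (by simp [h''])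
      · rw [if_neg hc] at h'
        exact Or.inl h'
    · exact Or.inr (by simp [h'] )

theorem pvAmb_mem (d : PySem.Dict String String) (qs : List (String × String)) (x : String) :
    x ∈ pvAmbiguous d qs → x ∈ qs.map Prod.fst := by
  intro h
  rcases pvAmb_mem_aux d qs _ x h with h' | h'
  · exact absurd h' (List.not_mem_nil)
  · exact h'

theorem pv_get?_mk_map {ν ν' : Type} (l : List (String × ν)) (g : String × ν → ν') (x : String) :
    (PySem.Dict.mk (l.map (fun q => (q.1, g q)))).get? x =
      (l.find? (fun q => q.1 == x)).map g := by
  show ((l.map (fun q => (q.1, g q))).find? (fun p => p.1 == x)).map (fun p => p.2) = _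
  rw [List.find?_map]
  simp [Option.map_map, Function.comp_def]

theorem pv_insert_same {ν : Type} (d : PySem.Dict String ν) (k : String) (v : ν)
    (hnd : d.keys.Nodup) (h : d.get? k = some v) : d.insert k v = d := by
  have hc : d.contains k = true := by
    rw [PySem.Dict.contains_eq_isSome_get?, h]; rfl
  apply PySem.Dict.ext
  rw [PySem.Dict.items_insert_of_contains _ _ hc]
  conv_rhs => rw [← List.map_id d.items]
  apply List.map_congr_left
  intro p hp
  by_cases hpk : p.1 = k
  · have : d.get? p.1 = some p.2 := PySem.Dict.get?_of_mem_items d hp hnd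
    rw [hpk] at this
    rw [this] at h
    have hv : p.2 = v := by injection h
    cases p
    simp_all
  · simp [hpk]

theorem pvMainLoop (ps : List (String × String)) :
    ps.foldl pvStepP (PySem.Dict.empty, PySem.Set.empty) =
      (PySem.Dict.mk (pvVariantMap (pvFirstOwner ps) (pvAmbiguous (pvFirstOwner ps) ps)),
        pvAmbiguous (pvFirstOwner ps) ps) := by
  induction ps using List.reverseRecOn with
  | nil => rfl
  | append_singleton qs p ih =>
    rw [List.foldl_append, List.foldl_cons, List.foldl_nil, ih]
    have hFO : pvFirstOwner (qs ++ [p]) = (pvFirstOwner qs).setdefault p.1 p.2 := pvFO_append qs p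
    have hAmbApp : ∀ d : PySem.Dict String String,
        pvAmbiguous d (qs ++ [p]) =
          (if p.2 ≠ d.getD p.1 "" then PySem.Set.add (pvAmbiguous d qs) p.1
           else pvAmbiguous d qs) := by
      intro d; simp [pvAmbiguous, List.foldl_append]
    by_cases hseen : p.1 ∈ qs.map Prod.fst
    · -- p.1 already in first_owner: setdefault is a no-op
      have hcF : (pvFirstOwner qs).contains p.1 = true :=
        (PySem.Dict.contains_iff_mem_keys _ _).mpr ((pvFO_mem_keys qs p.1).mpr hseen)
      have hFOeq : pvFirstOwner (qs ++ [p]) = pvFirstOwner qs := by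
        rw [hFO]; exact PySem.Dict.setdefault_of_contains _ _ hcF
      rw [hFOeq]
      rw [hAmbApp (pvFirstOwner qs)]
      obtain ⟨fo, hfo⟩ : ∃ fo, (pvFirstOwner qs).get? p.1 = some fo := by
        rw [PySem.Dict.contains_eq_isSome_get?] at hcF
        exact Option.isSome_iff_exists.mp hcF
      have hgetD : (pvFirstOwner qs).getD p.1 "" = fo := by
        rw [PySem.Dict.getD_eq_get?_getD, hfo]; rfl
      obtain ⟨q0, hq0find⟩ : ∃ q0, (pvFirstOwner qs).items.find? (fun q => q.1 == p.1) = some q0 := by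
        have : ((pvFirstOwner qs).items.find? (fun q => q.1 == p.1)).map (fun q => q.2) = some fo := hfo
        cases hfind : (pvFirstOwner qs).items.find? (fun q => q.1 == p.1) with
        | none => rw [hfind] at this; exact absurd this (by simp)
        | some q0 => exact ⟨q0, rfl⟩
      have hq01 : q0.1 = p.1 := by
        have := List.find?_some hq0find
        simpa using this
      have hq02 : q0.2 = fo := by
        have : ((pvFirstOwner qs).items.find? (fun q => q.1 == p.1)).map (fun q => q.2) = some fo := hfo
        rw [hq0find] at this
        simpa using this
      have hget : (PySem.Dict.mk
          (pvVariantMap (pvFirstOwner qs) (pvAmbiguous (pvFirstOwner qs) qs))).get? p.1 =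
          some (if (pvAmbiguous (pvFirstOwner qs) qs).contains p.1 then none else some fo) := by
        unfold pvVariantMap
        rw [pv_get?_mk_map, hq0find]
        simp [hq01, hq02]
      by_cases hA : (pvAmbiguous (pvFirstOwner qs) qs).contains p.1 = true
      · -- variant already ambiguous: everything is a no-op
        have hmemA : p.1 ∈ pvAmbiguous (pvFirstOwner qs) qs := (PySem.Set.contains_iff _ _).mp hA
        rw [if_pos hA] at hget
        simp only [pvStepP, hget]
        rw [if_pos (by simp)]
        have hAdd : PySem.Set.add (pvAmbiguous (pvFirstOwner qs) qs) p.1 =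
            pvAmbiguous (pvFirstOwner qs) qs := PySem.Set.add_of_mem hmemA
        have hAmb' : (if p.2 ≠ (pvFirstOwner qs).getD p.1 "" then
              PySem.Set.add (pvAmbiguous (pvFirstOwner qs) qs) p.1
            else pvAmbiguous (pvFirstOwner qs) qs) = pvAmbiguous (pvFirstOwner qs) qs := by
          split <;> simp [hAdd]
        rw [hAmb']
        have hins : (PySem.Dict.mk
            (pvVariantMap (pvFirstOwner qs) (pvAmbiguous (pvFirstOwner qs) qs))).insert p.1 none =
            PySem.Dict.mk (pvVariantMap (pvFirstOwner qs) (pvAmbiguous (pvFirstOwner qs) qs)) := by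
          apply pv_insert_same _ _ _ _ hget
          · unfold pvVariantMap
            rw [PySem.Dict.keys_mk]
            simp only [List.map_map]
            have : ((pvFirstOwner qs).items.map
                ((fun x => x.1) ∘ fun q =>
                  (q.1, if (pvAmbiguous (pvFirstOwner qs) qs).contains q.1 = true then none
                        else some q.2))) = (pvFirstOwner qs).keys := by
              simp [Function.comp_def, PySem.Dict.keys]
            rw [this]
            exact pvFO_keys_nodup qs
        rw [hins, hAdd]
      · rw [if_neg hA] at hget
        by_cases hbc : fo = p.2
        · -- same owner again: no-op on both sides
          simp only [pvStepP, hget]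
          rw [if_neg (by simp [hbc])]
          have hcond : ¬ p.2 ≠ (pvFirstOwner qs).getD p.1 "" := by rw [hgetD, hbc]; simp
          rw [if_neg hcond]
        · -- genuine conflict: value flips to none, variant becomes ambiguous
          simp only [pvStepP, hget]
          rw [if_pos (by simp [hbc])]
          have hcond : p.2 ≠ (pvFirstOwner qs).getD p.1 "" := by rw [hgetD]; exact fun h => hbc h.symm
          rw [if_pos hcond]
          refine Prod.ext ?_ rfl
          apply PySem.Dict.ext
          have hcVM : (PySem.Dict.mk
              (pvVariantMap (pvFirstOwner qs) (pvAmbiguous (pvFirstOwner qs) qs))).contains p.1 = true := by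
            rw [PySem.Dict.contains_eq_isSome_get?, hget]; rfl
          rw [PySem.Dict.items_insert_of_contains _ _ hcVM]
          show (((pvFirstOwner qs).items.map _).map _) = (pvFirstOwner qs).items.map _
          rw [List.map_map]
          apply List.map_congr_left
          intro q hq
          by_cases hq1 : q.1 = p.1
          · simp only [Function.comp_def, hq1]
            have hmem' : p.1 ∈ PySem.Set.add (pvAmbiguous (pvFirstOwner qs) qs) p.1 :=
              (PySem.Set.mem_add _ _ _).mpr (Or.inr rfl)
            simp [hmem']
          · simp only [Function.comp_def]
            have : (PySem.Set.add (pvAmbiguous (pvFirstOwner qs) qs) p.1).contains q.1 =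
                (pvAmbiguous (pvFirstOwner qs) qs).contains q.1 := by
              cases hc : (pvAmbiguous (pvFirstOwner qs) qs).contains q.1 with
              | true =>
                exact (PySem.Set.contains_iff _ _).mpr
                  ((PySem.Set.mem_add _ _ _).mpr (Or.inl ((PySem.Set.contains_iff _ _).mp hc)))
              | false =>
                have : q.1 ∉ PySem.Set.add (pvAmbiguous (pvFirstOwner qs) qs) p.1 := by
                  intro hmem
                  rcases (PySem.Set.mem_add _ _ _).mp hmem with h' | h'
                  · rw [(PySem.Set.contains_iff _ _).mpr h'] at hc; exact absurd hc (by simp)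
                  · exact hq1 h'
                exact Bool.eq_false_iff.mpr
                  (fun htrue => this ((PySem.Set.contains_iff _ _).mp htrue))
            simp [hq1]
    · -- fresh variant key
      have hcF : (pvFirstOwner qs).contains p.1 = false := by
        cases hc : (pvFirstOwner qs).contains p.1 with
        | false => rfl
        | true => exact absurd ((pvFO_mem_keys qs p.1).mp ((PySem.Dict.contains_iff_mem_keys _ _).mp hc)) hseen
      have hFOeq : pvFirstOwner (qs ++ [p]) = (pvFirstOwner qs).insert p.1 p.2 := by
        rw [hFO]; exact PySem.Dict.setdefault_of_not_contains _ _ hcF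
      have hFOitems : (pvFirstOwner (qs ++ [p])).items = (pvFirstOwner qs).items ++ [(p.1, p.2)] := by
        rw [hFOeq]; exact PySem.Dict.items_insert_of_not_contains _ _ hcF
      -- the appended element is not a conflict
      have hgetD' : (pvFirstOwner (qs ++ [p])).getD p.1 "" = p.2 := by
        rw [hFO, PySem.Dict.getD_setdefault_self]
        exact PySem.Dict.getD_of_not_contains _ _ hcF
      have hcongr : pvAmbiguous (pvFirstOwner (qs ++ [p])) qs = pvAmbiguous (pvFirstOwner qs) qs := by
        apply pvAmb_congr
        intro q hq
        have hq1 : q.1 ≠ p.1 := by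
          intro h
          exact hseen (h ▸ (List.mem_map.mpr ⟨q, hq, rfl⟩))
        rw [hFO, PySem.Dict.getD_eq_get?_getD, PySem.Dict.get?_setdefault_of_ne _ _ hq1,
          ← PySem.Dict.getD_eq_get?_getD]
      have hAmb' : pvAmbiguous (pvFirstOwner (qs ++ [p])) (qs ++ [p]) =
          pvAmbiguous (pvFirstOwner qs) qs := by
        rw [hAmbApp, hgetD', if_neg (by simp), hcongr]
      -- A's lookup misses
      have hget : (PySem.Dict.mk
          (pvVariantMap (pvFirstOwner qs) (pvAmbiguous (pvFirstOwner qs) qs))).get? p.1 = none := by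
        unfold pvVariantMap
        rw [pv_get?_mk_map]
        have : (pvFirstOwner qs).items.find? (fun q => q.1 == p.1) = none := by
          have hg : (pvFirstOwner qs).get? p.1 = none := by
            rw [PySem.Dict.contains_eq_isSome_get?] at hcF
            exact Option.not_isSome_iff_eq_none.mp (by simp [hcF])
          cases hfind : (pvFirstOwner qs).items.find? (fun q => q.1 == p.1) with
          | none => rfl
          | some q0 =>
            have : ((pvFirstOwner qs).items.find? (fun q => q.1 == p.1)).map (fun q => q.2) = none := hg
            rw [hfind] at this
            exact absurd this (by simp)
        rw [this]; rfl
      simp only [pvStepP, hget]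
      have hcVM : (PySem.Dict.mk
          (pvVariantMap (pvFirstOwner qs) (pvAmbiguous (pvFirstOwner qs) qs))).contains p.1 = false := by
        rw [PySem.Dict.contains_eq_isSome_get?, hget]; rfl
      rw [hAmb']
      refine Prod.ext ?_ rfl
      apply PySem.Dict.ext
      rw [PySem.Dict.items_insert_of_not_contains _ _ hcVM]
      unfold pvVariantMap
      rw [hFOitems, List.map_append]
      have hnotA : (pvAmbiguous (pvFirstOwner qs) qs).contains p.1 = false := by
        cases hc : (pvAmbiguous (pvFirstOwner qs) qs).contains p.1 with
        | false => rfl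
        | true =>
          exact absurd (pvAmb_mem _ _ _ ((PySem.Set.contains_iff _ _).mp hc)) hseen
      have hnotAmem : p.1 ∉ pvAmbiguous (pvFirstOwner qs) qs := fun hm => by
        rw [(PySem.Set.contains_iff _ _).mpr hm] at hnotA
        exact absurd hnotA (by decide)
      simp [hnotAmem]

def pvPairStream (kn : Nat) (rec : List (String × String)) : List (String × String) :=
  (pvVariantStream ((PySem.Dict.mk rec).getD "barcode" "") kn).map
    (fun v => (v, (PySem.Dict.mk rec).getD "barcode" ""))

theorem pv_loopA_eq (design : List (List (String × String))) (mmA : Int) (kn : Nat)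
    (h1 : 1 ≤ mmA ↔ 1 ≤ kn) (h2 : 2 ≤ mmA ↔ 2 ≤ kn) (hk : kn ≤ 2) :
    design.foldl
      (fun (st : PySem.Dict String (Option String) × PySem.Set String) rec =>
        (generate_barcode_variants ((PySem.Dict.mk rec).getD "barcode" "") mmA).foldl
          (fun st v => pvStepP st (v, (PySem.Dict.mk rec).getD "barcode" "")) st)
      (PySem.Dict.empty, PySem.Set.empty)
    = (design.flatMap (pvPairStream kn)).foldl pvStepP (PySem.Dict.empty, PySem.Set.empty) := by
  rw [List.foldl_flatMap]
  apply PySem.List.foldl_congr_mem'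
  intro rec _ st
  rw [pv_gen_eq _ _ kn h1 h2 hk]
  unfold pvPairStream
  rw [List.foldl_map]

-- ===== VERDICT (by name: the statement is the Claim_ definition above) =====
theorem build_barcode_maps_spec : Claim_equal_build_barcode_maps := by
  intro design mm _ _
  unfold Spec_build_barcode_maps build_barcode_maps build_barcode_maps_alt
  cases h : pvScanBarcodes design with
  | none => rfl
  | some btd =>
    have h1 : 1 ≤ (if mm < 0 then 0 else mm : Int) ↔
        1 ≤ ((if mm < 0 then (0 : Int) else min mm 2)).toNat := by split_ifs <;> omega
    have h2 : 2 ≤ (if mm < 0 then 0 else mm : Int) ↔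
        2 ≤ ((if mm < 0 then (0 : Int) else min mm 2)).toNat := by split_ifs <;> omega
    have hk : ((if mm < 0 then (0 : Int) else min mm 2)).toNat ≤ 2 := by split_ifs <;> omega
    change
      (btd.items,
        (design.foldl
          (fun (st : PySem.Dict String (Option String) × PySem.Set String) rec =>
            (generate_barcode_variants ((PySem.Dict.mk rec).getD "barcode" "")
                (if mm < 0 then 0 else mm)).foldl
              (fun st v => pvStepP st (v, (PySem.Dict.mk rec).getD "barcode" "")) st)
          (PySem.Dict.empty, PySem.Set.empty)).1.items,
        (design.foldl
          (fun (st : PySem.Dict String (Option String) × PySem.Set String) rec =>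
            (generate_barcode_variants ((PySem.Dict.mk rec).getD "barcode" "")
                (if mm < 0 then 0 else mm)).foldl
              (fun st v => pvStepP st (v, (PySem.Dict.mk rec).getD "barcode" "")) st)
          (PySem.Dict.empty, PySem.Set.empty)).2)
      = (btd.items,
        pvVariantMap
          (pvFirstOwner (design.foldl
            (fun acc rec => acc ++
              pvPairStream ((if mm < 0 then (0 : Int) else min mm 2)).toNat rec) []))
          (pvAmbiguous
            (pvFirstOwner (design.foldl
              (fun acc rec => acc ++
                pvPairStream ((if mm < 0 then (0 : Int) else min mm 2)).toNat rec) []))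
            (design.foldl
              (fun acc rec => acc ++
                pvPairStream ((if mm < 0 then (0 : Int) else min mm 2)).toNat rec) [])),
        pvAmbiguous
          (pvFirstOwner (design.foldl
            (fun acc rec => acc ++
              pvPairStream ((if mm < 0 then (0 : Int) else min mm 2)).toNat rec) []))
          (design.foldl
            (fun acc rec => acc ++
              pvPairStream ((if mm < 0 then (0 : Int) else min mm 2)).toNat rec) []))
    rw [pv_loopA_eq design _ _ h1 h2 hk]
    rw [show design.foldl
        (fun acc rec => acc ++
          pvPairStream ((if mm < 0 then (0 : Int) else min mm 2)).toNat rec) []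
      = design.flatMap (pvPairStream ((if mm < 0 then (0 : Int) else min mm 2)).toNat) from by
        simpa using PySem.List.foldl_append_eq_flatMap
          (pvPairStream ((if mm < 0 then (0 : Int) else min mm 2)).toNat) design []]
    rw [pvMainLoop]
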